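-- pv_equiv track=rewrite | github.com/a-brandon/practice | edabit/almost_sorted_sequence.py | almost_sorted
-- ===== SOURCE A (Python) =====
-- def almost_sorted(lst):
--     if lst in [sorted(lst), sorted(lst, reverse=True)]:
--         return False
--
--     i = 0
--     while i < len(lst):
--         x = lst.pop(i)
--         if lst == sorted(lst) or lst == sorted(lst, reverse=True):
--             return True
--         lst.insert(i, x)
--         i += 1
--     return False
-- ===== SOURCE B (Python) =====
-- def almost_sorted(lst):
--     # O(n): a list whose first descent is at i can only become non-decreasing
--     # by deleting element i or i+1; descending is the same check on the negated list.
--     # (Return value only: A pops an element out of lst permanently when it returns True.)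
--     def mono(seq):
--         return all(a <= b for a, b in zip(seq, seq[1:]))
--
--     def fixable(seq):
--         # seq is known to have a descent somewhere
--         i = 0
--         while seq[i] <= seq[i + 1]:
--             i += 1
--         return mono(seq[:i] + seq[i + 1:]) or mono(seq[:i + 1] + seq[i + 2:])
--
--     neg = [-x for x in lst]
--     if mono(lst) or mono(neg):
--         return False
--     return fixable(lst) or fixable(neg)
-- ===== Notes on version B (the rewrite author's own statement) =====
-- stated objective: faster
-- what changed: A tries deleting every index and re-sorts the remainder twice each time (O(n^2 log n)); B does a linear scan: only deleting one end of the first out-of-order adjacent pair (of the list or its negation, for the descending case) can make it monotone, checked in O(n).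
import Mathlib
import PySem

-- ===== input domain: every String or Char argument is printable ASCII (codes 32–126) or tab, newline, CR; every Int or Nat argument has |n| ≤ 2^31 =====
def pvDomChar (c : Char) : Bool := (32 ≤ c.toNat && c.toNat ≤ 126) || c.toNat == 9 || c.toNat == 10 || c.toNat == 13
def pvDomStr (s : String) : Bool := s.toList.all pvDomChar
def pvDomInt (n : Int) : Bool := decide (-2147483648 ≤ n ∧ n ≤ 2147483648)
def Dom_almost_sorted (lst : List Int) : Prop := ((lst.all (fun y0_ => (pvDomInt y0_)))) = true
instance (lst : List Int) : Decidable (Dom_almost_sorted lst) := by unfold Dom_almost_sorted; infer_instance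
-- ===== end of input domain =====

-- B replaces A's try-every-deletion-and-sort scan (O(n^2 log n)) by a linear scan:
-- only deleting one end of the FIRST out-of-order adjacent pair can help.
-- Return value only: Python A pops an element out of lst permanently when it returns True.

-- ===== PORT A =====
-- while i < len(lst): x = lst.pop(i); …; lst.insert(i, x); i += 1
-- lst.insert(i, x) exactly restores the list popped from, so each iteration
-- sees the original lst; lst.pop(i) with 0 ≤ i < len is lst.eraseIdx i.
def almostLoop (lst : List Int) (i : Nat) : Bool :=
  if _h : i < lst.length then
    -- rest = lst after the pop; compared against its two sorts
    if lst.eraseIdx i = PySem.List.sorted (lst.eraseIdx i) (fun x => x) ∨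
        lst.eraseIdx i = PySem.List.sorted (lst.eraseIdx i) (fun x => x) true then
      true
    else
      almostLoop lst (i + 1)
  else false
termination_by lst.length - i

def almost_sorted (lst : List Int) : Bool :=
  -- lst in [sorted(lst), sorted(lst, reverse=True)]
  if lst = PySem.List.sorted lst (fun x => x) ∨ lst = PySem.List.sorted lst (fun x => x) true then
    false
  else
    almostLoop lst 0

-- ===== PORT B =====
-- mono(seq): all(a <= b for a, b in zip(seq, seq[1:]))
def monoB (seq : List Int) : Bool :=
  (seq.zip (seq.drop 1)).all (fun p => decide (p.1 ≤ p.2))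

-- while seq[i] <= seq[i+1]: i += 1   (only run when a descent exists, so the
-- indices stay in range; the bounds test here is a totality guard only)
def descIdx (seq : List Int) (i : Nat) : Nat :=
  if _h : i + 1 < seq.length then
    if seq.getD i 0 ≤ seq.getD (i + 1) 0 then descIdx seq (i + 1) else i
  else i
termination_by seq.length - i

-- fixable(seq): slices seq[:i], seq[i+1:] with i ≥ 0 are take/drop exactly
def fixB (seq : List Int) : Bool :=
  let i := descIdx seq 0
  monoB (seq.take i ++ seq.drop (i + 1)) || monoB (seq.take (i + 1) ++ seq.drop (i + 2))

def almost_sorted_alt (lst : List Int) : Bool :=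
  let neg := lst.map (fun x => -x)
  if monoB lst || monoB neg then false
  else fixB lst || fixB neg

-- ===== PRECONDITION & SPEC =====
def Spec_almost_sorted (lst : List Int) (out : Bool) : Prop := out = almost_sorted_alt lst
instance (lst : List Int) (out : Bool) : Decidable (Spec_almost_sorted lst out) := by unfold Spec_almost_sorted; infer_instance

-- ===== CLAIM (what is proved, stated in full; the proofs are below) =====
def Claim_equal_almost_sorted : Prop := ∀ (lst : List Int), Dom_almost_sorted lst → Spec_almost_sorted lst (almost_sorted lst)

-- ===== LEMMAS AND PROOFS =====

/-- adjacent non-decreasing, phrased with `getD` to keep indices proof-free -/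
def AdjLe (l : List Int) : Prop := ∀ k, k + 1 < l.length → l.getD k 0 ≤ l.getD (k + 1) 0

theorem adjLe_cons2 (a b : Int) (t : List Int) :
    AdjLe (a :: b :: t) ↔ a ≤ b ∧ AdjLe (b :: t) := by
  constructor
  · intro h
    refine ⟨h 0 (by simp), fun k hk => ?_⟩
    have := h (k + 1) (by simpa using hk)
    simpa using this
  · rintro ⟨hab, h⟩ k hk
    cases k with
    | zero => simpa using hab
    | succ k => have := h k (by simpa using hk); simpa using this

theorem monoB_adj (l : List Int) : monoB l = true ↔ AdjLe l := by
  induction l with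
  | nil => simp [monoB, AdjLe]
  | cons a t ih =>
    cases t with
    | nil => simp [monoB, AdjLe]
    | cons b t =>
      have : monoB (a :: b :: t) = (decide (a ≤ b) && monoB (b :: t)) := by
        simp [monoB]
      rw [this, adjLe_cons2]
      simp [ih]

theorem pairwise_iff_adj (l : List Int) : l.Pairwise (· ≤ ·) ↔ AdjLe l := by
  rw [List.pairwise_iff_getElem]
  constructor
  · intro h k hk
    have hk1 : k < l.length := by omega
    rw [List.getD_eq_getElem l 0 hk1, List.getD_eq_getElem l 0 hk]
    exact h k (k + 1) hk1 hk (by omega)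
  · intro h
    have aux : ∀ d i, (hd : i + d + 1 < l.length) → l[i]'(by omega) ≤ l[i + d + 1]'hd := by
      intro d
      induction d with
      | zero =>
        intro i hd
        have := h i (by omega)
        rw [List.getD_eq_getElem l 0 (by omega), List.getD_eq_getElem l 0 (by omega)] at this
        simpa using this
      | succ d ihd =>
        intro i hd
        have h1 : l[i]'(by omega) ≤ l[i + d + 1]'(by omega) := ihd i (by omega)
        have h2 := h (i + d + 1) (by omega)
        rw [List.getD_eq_getElem l 0 (by omega), List.getD_eq_getElem l 0 (by omega)] at h2
        have h3 : l[i + d + 1 + 1]'(by omega) = l[i + (d + 1) + 1]'(by omega) := by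
          congr 1 <;> omega
        exact le_trans h1 (h3 ▸ h2)
    intro i j hi hj hij
    have := aux (j - i - 1) i (by omega)
    have heq : l[i + (j - i - 1) + 1]'(by omega) = l[j]'hj := by congr 1 <;> omega
    rwa [heq] at this

theorem sortedA_iff (l : List Int) :
    (l = PySem.List.sorted l (fun x => x)) ↔ AdjLe l := by
  constructor
  · intro h
    rw [← pairwise_iff_adj]
    have := PySem.List.sorted_pairwise l (fun x => x)
    simpa [← h] using this
  · intro h
    have := PySem.List.sorted_eq_self_of_pairwise l (fun x => x)
      (by simpa using (pairwise_iff_adj l).mpr h)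
    exact this.symm

theorem pairwise_ge_iff_map_neg (l : List Int) :
    l.Pairwise (fun a b => b ≤ a) ↔ (l.map (fun x => -x)).Pairwise (· ≤ ·) := by
  rw [List.pairwise_map]
  constructor
  · exact fun h => h.imp fun hab => by omega
  · exact fun h => h.imp fun hab => by omega

theorem sortedD_iff (l : List Int) :
    (l = PySem.List.sorted l (fun x => x) true) ↔ AdjLe (l.map (fun x => -x)) := by
  constructor
  · intro h
    rw [← pairwise_iff_adj, ← pairwise_ge_iff_map_neg]
    have := PySem.List.sorted_pairwise_rev l (fun x => x)
    simpa [← h] using this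
  · intro h
    have hp : l.Pairwise (fun a b => b ≤ a) := by
      rw [pairwise_ge_iff_map_neg]
      exact (pairwise_iff_adj _).mpr h
    have := PySem.List.sorted_rev_eq_self_of_pairwise l (fun x => x) (by simpa using hp)
    exact this.symm

theorem take_drop_erase (l : List Int) : ∀ i, l.take i ++ l.drop (i + 1) = l.eraseIdx i := by
  induction l with
  | nil => intro i; simp
  | cons a t ih =>
    intro i
    cases i with
    | zero => simp
    | succ i => simp [List.eraseIdx_cons_succ, ih i]

theorem map_erase (f : Int → Int) (l : List Int) : ∀ i, (l.map f).eraseIdx i = (l.eraseIdx i).map f := by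
  induction l with
  | nil => intro i; simp
  | cons a t ih =>
    intro i
    cases i with
    | zero => simp
    | succ i => simp [List.eraseIdx_cons_succ, ih i]

theorem getD_eraseIdx (l : List Int) (i k : Nat) (hi : i < l.length) (hk : k + 1 < l.length) :
    (l.eraseIdx i).getD k 0 = if k < i then l.getD k 0 else l.getD (k + 1) 0 := by
  have hlen : (l.eraseIdx i).length = l.length - 1 := by
    rw [List.length_eraseIdx]; simp [hi]
  have hk' : k < (l.eraseIdx i).length := by omega
  rw [List.getD_eq_getElem _ 0 hk', List.getElem_eraseIdx]
  split
  · rw [List.getD_eq_getElem l 0 (by omega)]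
  · rw [List.getD_eq_getElem l 0 (by omega)]

/-- what the while loop in fixable computes: first descent position -/
theorem descIdx_spec (l : List Int) (hn : ¬ AdjLe l) :
    ∀ i, (∀ k, k + 1 < l.length → k < i → l.getD k 0 ≤ l.getD (k + 1) 0) →
      (descIdx l i + 1 < l.length ∧
       ¬ l.getD (descIdx l i) 0 ≤ l.getD (descIdx l i + 1) 0 ∧
       ∀ k, k + 1 < l.length → k < descIdx l i → l.getD k 0 ≤ l.getD (k + 1) 0) := by
  intro i
  induction i using descIdx.induct l with
  | case1 i hi hle ih =>
    intro hpre
    rw [descIdx, dif_pos hi, if_pos hle]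
    exact ih (by
      intro k hk hki
      rcases Nat.lt_or_ge k i with h | h
      · exact hpre k hk h
      · have : k = i := by omega
        subst this; exact hle)
  | case2 i hi hgt =>
    intro hpre
    rw [descIdx, dif_pos hi, if_neg hgt]
    exact ⟨hi, hgt, hpre⟩
  | case3 i hi =>
    intro hpre
    exfalso
    exact hn (fun k hk => hpre k hk (by omega))

/-- removing any single element can only help at the first descent -/
theorem key_lemma (l : List Int) (hn : ¬ AdjLe l) :
    (∃ j, j < l.length ∧ AdjLe (l.eraseIdx j)) ↔
      (AdjLe (l.eraseIdx (descIdx l 0)) ∨ AdjLe (l.eraseIdx (descIdx l 0 + 1))) := by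
  obtain ⟨hd1, hd2, _hd3⟩ := descIdx_spec l hn 0 (by omega)
  set d := descIdx l 0 with hdd
  constructor
  · rintro ⟨j, hj, hadj⟩
    have hlen : (l.eraseIdx j).length = l.length - 1 := by
      rw [List.length_eraseIdx]; simp [hj]
    by_cases hjd : j = d
    · left; rwa [← hjd]
    by_cases hjd1 : j = d + 1
    · right; rwa [← hjd1]
    exfalso
    rcases Nat.lt_or_ge j d with hlt | hge
    · -- j < d: the pair (d, d+1) sits at (d-1, d) in eraseIdx j
      have h1 : d - 1 + 1 < (l.eraseIdx j).length := by omega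
      have := hadj (d - 1) h1
      rw [getD_eraseIdx l j (d - 1) (by omega) (by omega),
          getD_eraseIdx l j (d - 1 + 1) (by omega) (by omega)] at this
      rw [if_neg (by omega), if_neg (by omega)] at this
      have he : d - 1 + 1 = d := by omega
      rw [he] at this
      exact hd2 this
    · -- j ≥ d + 2: the pair (d, d+1) survives at (d, d+1)
      have hge2 : d + 2 ≤ j := by omega
      have h1 : d + 1 < (l.eraseIdx j).length := by omega
      have := hadj d h1
      rw [getD_eraseIdx l j d (by omega) (by omega),
          getD_eraseIdx l j (d + 1) (by omega) (by omega)] at this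
      rw [if_pos (by omega), if_pos (by omega)] at this
      exact hd2 this
  · rintro (h | h)
    · exact ⟨d, by omega, h⟩
    · exact ⟨d + 1, by omega, h⟩

theorem almostLoop_iff (lst : List Int) : ∀ i, almostLoop lst i = true ↔
    ∃ j, i ≤ j ∧ j < lst.length ∧
      (AdjLe (lst.eraseIdx j) ∨ AdjLe ((lst.eraseIdx j).map (fun x => -x))) := by
  intro i
  induction i using almostLoop.induct lst with
  | case1 i hi hcond =>
    rw [almostLoop, dif_pos hi, if_pos hcond]
    rw [sortedA_iff, sortedD_iff] at hcond
    simp only [true_iff]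
    exact ⟨i, le_refl i, hi, hcond⟩
  | case2 i hi hcond ih =>
    rw [almostLoop, dif_pos hi, if_neg hcond]
    rw [sortedA_iff, sortedD_iff] at hcond
    push Not at hcond
    rw [ih]
    constructor
    · rintro ⟨j, h1, h2, h3⟩; exact ⟨j, by omega, h2, h3⟩
    · rintro ⟨j, h1, h2, h3⟩
      refine ⟨j, ?_, h2, h3⟩
      rcases Nat.lt_or_ge j (i + 1) with h | h
      · have : j = i := by omega
        subst this
        rcases h3 with h3 | h3
        · exact absurd h3 (by tauto)
        · exact absurd h3 (by tauto)
      · exact h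
  | case3 i hi =>
    rw [almostLoop, dif_neg hi]
    constructor
    · intro hh; simp at hh
    · rintro ⟨j, h1, h2, _⟩; omega

theorem fixB_iff (l : List Int) :
    fixB l = true ↔
      (AdjLe (l.eraseIdx (descIdx l 0)) ∨ AdjLe (l.eraseIdx (descIdx l 0 + 1))) := by
  unfold fixB
  rw [Bool.or_eq_true, monoB_adj, monoB_adj, take_drop_erase, take_drop_erase]

-- ===== VERDICT (by name: the statement is the Claim_ definition above) =====
theorem almost_sorted_spec : Claim_equal_almost_sorted := by
  intro lst _hdom
  unfold Spec_almost_sorted almost_sorted almost_sorted_alt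
  have hcond : (lst = PySem.List.sorted lst (fun x => x) ∨
      lst = PySem.List.sorted lst (fun x => x) true) ↔
      (monoB lst || monoB (lst.map (fun x => -x))) = true := by
    rw [Bool.or_eq_true, monoB_adj, monoB_adj, sortedA_iff, sortedD_iff]
  by_cases h : lst = PySem.List.sorted lst (fun x => x) ∨
      lst = PySem.List.sorted lst (fun x => x) true
  · rw [if_pos h, if_pos (hcond.mp h)]
  · rw [if_neg h, if_neg (fun hb => h (hcond.mpr hb))]
    rw [sortedA_iff, sortedD_iff] at h
    push Not at h
    obtain ⟨hn1, hn2⟩ := h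
    have hmaplen : (lst.map (fun x : Int => -x)).length = lst.length := by simp
    rw [Bool.eq_iff_iff, almostLoop_iff lst 0, Bool.or_eq_true, fixB_iff, fixB_iff]
    rw [← key_lemma lst hn1]
    have hkey2 := key_lemma (lst.map (fun x => -x)) hn2
    rw [← hkey2]
    constructor
    · rintro ⟨j, _, hj, h | h⟩
      · exact Or.inl ⟨j, hj, h⟩
      · right
        refine ⟨j, by omega, ?_⟩
        rwa [map_erase]
    · rintro (⟨j, hj, h⟩ | ⟨j, hj, h⟩)
      · exact ⟨j, by omega, hj, Or.inl h⟩
      · refine ⟨j, by omega, by omega, Or.inr ?_⟩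
        rwa [← map_erase]
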